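-- pv_equiv track=rewrite | github.com/alexarnautu/advent-of-code-2023 | day-3-2.py | __build_numbers_from_starting_positions
-- ===== SOURCE A (Python) =====
-- from typing import Generator, Tuple
-- from collections import defaultdict
--
-- ENGINE_SCHEMATIC = list[list[str]]
--
-- POSITION_WITH_START = tuple[int, int, int, int]
--
-- NAVIGATION_DIRECTIONS = (
--     (0, 1),
--     (1, 0),
--     (0, -1),
--     (-1, 0),
--     (1, 1),
--     (-1, -1),
--     (1, -1),
--     (-1, 1),
-- )
--
-- def __find_adjacent_digits_positions(
--     engine_schematic: ENGINE_SCHEMATIC,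
-- ) -> Generator[POSITION_WITH_START, None, None]:
--     for row_index in range(len(engine_schematic)):
--         for column_index in range(len(engine_schematic[row_index])):
--             if not engine_schematic[row_index][column_index] == "*":
--                 continue
--
--             for row_direction, column_direction in NAVIGATION_DIRECTIONS:
--                 if (
--                     row_index + row_direction < 0
--                     or row_index + row_direction >= len(engine_schematic)
--                     or column_index + column_direction < 0
--                     or column_index + column_direction
--                     >= len(engine_schematic[row_index])
--                 ):
--                     continue
--
--                 if engine_schematic[row_index + row_direction][
--                     column_index + column_direction
--                 ].isdigit():
--                     yield (
--                         row_index,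
--                         column_index,
--                         row_index + row_direction,
--                         column_index + column_direction,
--                     )
--
-- def __build_number_from_starting_position(
--     row_index: int, column_index: int, engine_schematic: ENGINE_SCHEMATIC
-- ) -> Tuple[int, int, int]:
--     left_index, right_index = column_index, column_index
--
--     while left_index >= 0 and engine_schematic[row_index][left_index - 1].isdigit():
--         left_index -= 1
--
--     while (
--         right_index < len(engine_schematic[row_index]) - 1
--         and engine_schematic[row_index][right_index + 1].isdigit()
--     ):
--         right_index += 1
--
--     return (
--         int("".join(engine_schematic[row_index][left_index : right_index + 1])),
--         left_index,
--         row_index,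
--     )
--
-- def __build_numbers_from_starting_positions(
--     engine_schematic: ENGINE_SCHEMATIC,
-- ) -> dict[tuple[int, int], set[tuple[int, int, int]]]:
--     adjacent_digits_positions = __find_adjacent_digits_positions(engine_schematic)
--
--     numbers_grouped_by_starting_position = defaultdict(set)
--
--     for (
--         start_row_index,
--         start_column_index,
--         row_index,
--         column_index,
--     ) in adjacent_digits_positions:
--         number_and_range = __build_number_from_starting_position(
--             row_index, column_index, engine_schematic
--         )
--         numbers_grouped_by_starting_position[(start_row_index, start_column_index)].add(
--             number_and_range
--         )
--
--     return numbers_grouped_by_starting_position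
-- ===== SOURCE B (Python) =====
-- # B: one pass per row precomputes, for every digit cell, the (number, start_column, row)
-- # triple of the maximal digit run containing it; each '*' then does O(1) table lookups
-- # per direction instead of re-expanding the number left and right for every neighbor.
--
-- NAVIGATION_DIRECTIONS = (
--     (0, 1),
--     (1, 0),
--     (0, -1),
--     (-1, 0),
--     (1, 1),
--     (-1, -1),
--     (1, -1),
--     (-1, 1),
-- )
--
--
-- def __build_numbers_from_starting_positions(engine_schematic):
--     # table[r][c] = (number, start_column, r) if cell (r, c) is a digit, else None
--     table = []
--     for r, row in enumerate(engine_schematic):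
--         entries = []
--         c = 0
--         n = len(row)
--         while c < n:
--             if row[c].isdigit():
--                 stop = c
--                 while stop < n and row[stop].isdigit():
--                     stop += 1
--                 triple = (int("".join(row[c:stop])), c, r)
--                 entries.extend([triple] * (stop - c))
--                 c = stop
--             else:
--                 entries.append(None)
--                 c += 1
--         table.append(entries)
--
--     groups = {}
--     for r, row in enumerate(engine_schematic):
--         for c, cell in enumerate(row):
--             if cell != "*":
--                 continue
--             found = []
--             for dr, dc in NAVIGATION_DIRECTIONS:
--                 nr, nc = r + dr, c + dc
--                 if 0 <= nr < len(engine_schematic) and 0 <= nc < len(row):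
--                     row_entries = table[nr]
--                     if nc < len(row_entries):
--                         t = row_entries[nc]
--                         if t is not None and t not in found:
--                             found.append(t)
--             if found:
--                 groups[(r, c)] = set(found)
--     return groups
-- ===== Notes on version B (the rewrite author's own statement) =====
-- stated objective: alternative
-- what changed: B precomputes, in one pass per row, a table mapping every digit cell to its full run triple (number, start column, row), so each '*' does table lookups per direction instead of A's re-expanding the number left and right for every star neighbour (trades a full-grid precompute pass for the per-neighbour scans; not measurably faster on the sampled inputs).
-- outside the precondition, e.g. on __build_numbers_from_starting_positions([['*'], ['1']]): A returns {(0, 0): {(1, -1, 1)}}, B returns {(0, 0): {(1, 0, 1)}}; on __build_numbers_from_starting_positions([['*', '.', '.'], ['1', '.', '2']]): A raises ValueError, B returns {(0, 0): {(1, 0, 1)}}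
import Mathlib
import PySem

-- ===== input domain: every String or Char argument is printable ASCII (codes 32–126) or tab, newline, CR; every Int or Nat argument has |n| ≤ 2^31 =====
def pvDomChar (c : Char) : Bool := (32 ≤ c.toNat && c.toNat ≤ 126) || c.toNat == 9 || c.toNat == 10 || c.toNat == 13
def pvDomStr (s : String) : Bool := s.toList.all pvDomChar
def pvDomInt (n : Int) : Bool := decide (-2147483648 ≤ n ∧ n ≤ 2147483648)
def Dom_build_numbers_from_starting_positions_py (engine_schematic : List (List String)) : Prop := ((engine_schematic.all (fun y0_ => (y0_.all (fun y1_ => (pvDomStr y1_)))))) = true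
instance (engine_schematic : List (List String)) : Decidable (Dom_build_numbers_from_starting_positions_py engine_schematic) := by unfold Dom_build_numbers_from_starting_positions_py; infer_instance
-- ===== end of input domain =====

-- B replaces A's per-neighbour left/right re-expansion of each number by a one-pass-per-row
-- table of run triples looked up per star neighbour (objective: alternative algorithm);
-- equality of the returned value is claimed on Pre_ below.

-- ===== PORT A =====

def pvDirs : List (Int × Int) := [(0,1),(1,0),(0,-1),(-1,0),(1,1),(-1,-1),(1,-1),(-1,1)]

def pvDigit (s : String) : Bool := PySem.Str.strIsdigit s

-- while left_index >= 0 and engine_schematic[row_index][left_index - 1].isdigit(): left_index -= 1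
-- (at left_index = 0 Python reads index -1, the row's last cell: pyGetD models that wraparound)
def pvGoLeft (row : List String) : Nat → Int
  | 0 => if pvDigit (PySem.List.pyGetD row (-1) "") then -1 else 0
  | k+1 => if pvDigit (PySem.List.pyGetD row (k : Int) "") then pvGoLeft row k else ((k : Int) + 1)

-- while right_index < len(row) - 1 and engine_schematic[row_index][right_index + 1].isdigit():
--   right_index += 1
-- (fuel-based structural recursion; fuel row.length is enough, the loop body only reads the list)
def pvGoRightAux (row : List String) : Nat → Nat → Nat
  | 0, k => k
  | fuel+1, k =>
    if k + 1 < row.length ∧ pvDigit (PySem.List.pyGetD row ((k : Int) + 1) "") = true then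
      pvGoRightAux row fuel (k + 1)
    else k

def pvGoRight (row : List String) (k : Nat) : Nat := pvGoRightAux row row.length k

-- __build_number_from_starting_position (column_index ≥ 0 is guaranteed by the caller's bound
-- guard, so Int.toNat is exact there)
def pvBuildNum (es : List (List String)) (r c : Int) : Int × Int × Int :=
  let row := PySem.List.pyGetD es r []
  let L := pvGoLeft row c.toNat
  let R := pvGoRight row c.toNat
  ((PySem.Int.ofStr? (PySem.Str.join "" (PySem.List.slice row (some L) (some ((R : Int) + 1))))).getD 0,
   L, r)

-- __find_adjacent_digits_positions
def pvFindAdj (es : List (List String)) : List (Int × Int × Int × Int) :=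
  (PySem.List.pyRange 0 (es.length : Int)).flatMap (fun r =>
    (PySem.List.pyRange 0 ((PySem.List.pyGetD es r []).length : Int)).flatMap (fun c =>
      if PySem.List.pyGetD (PySem.List.pyGetD es r []) c "" == "*" then
        pvDirs.filterMap (fun d =>
          if r + d.1 < 0 ∨ r + d.1 ≥ (es.length : Int) ∨ c + d.2 < 0 ∨
              c + d.2 ≥ ((PySem.List.pyGetD es r []).length : Int) then none
          else if pvDigit (PySem.List.pyGetD (PySem.List.pyGetD es (r + d.1) []) (c + d.2) "") then
            some (r, c, r + d.1, c + d.2)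
          else none)
      else []))

def build_numbers_from_starting_positions_py (engine_schematic : List (List String)) :
    List (Int × Int × List (Int × Int × Int)) :=
  (((pvFindAdj engine_schematic).foldl
      (fun d p =>
        PySem.Dict.modify d (p.1, p.2.1) PySem.Set.empty
          (fun s => PySem.Set.add s (pvBuildNum engine_schematic p.2.2.1 p.2.2.2)))
      PySem.Dict.empty).items).map (fun q => (q.1.1, q.1.2, q.2))

-- ===== PORT B =====

-- inner `while stop < n and row[stop].isdigit(): stop += 1` (fuel-based; row.length is enough)
def pvRunStopAux (row : List String) : Nat → Nat → Nat
  | 0, c => c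
  | fuel+1, c =>
    if c < row.length ∧ pvDigit (row.getD c "") = true then pvRunStopAux row fuel (c + 1) else c

def pvRunStop (row : List String) (c : Nat) : Nat := pvRunStopAux row row.length c

-- the outer `while c < n` loop of B's table pass, producing one row of the table
-- (fuel-based; each iteration advances c by at least one, so fuel row.length is enough)
def pvRowEntriesAux (row : List String) (r : Int) : Nat → Nat → List (Option (Int × Int × Int))
  | 0, _ => []
  | fuel+1, c =>
    if c < row.length then
      if pvDigit (row.getD c "") = true then
        let stop := pvRunStop row c
        List.replicate (stop - c)
          (some ((PySem.Int.ofStr? (PySem.Str.join ""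
                    (PySem.List.slice row (some (c : Int)) (some (stop : Int))))).getD 0,
                 (c : Int), r))
          ++ pvRowEntriesAux row r fuel stop
      else none :: pvRowEntriesAux row r fuel (c + 1)
    else []

def pvRowEntries (row : List String) (r : Int) : List (Option (Int × Int × Int)) :=
  pvRowEntriesAux row r row.length 0

def pvTableOf (es : List (List String)) : List (List (Option (Int × Int × Int))) :=
  (PySem.List.enumerate es).map (fun p => pvRowEntries p.2 p.1)

def build_numbers_from_starting_positions_py_alt (engine_schematic : List (List String)) :
    List (Int × Int × List (Int × Int × Int)) :=
  let table := pvTableOf engine_schematic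
  (((PySem.List.enumerate engine_schematic).foldl (fun d rp =>
      (PySem.List.enumerate rp.2).foldl (fun d cp =>
        if cp.2 == "*" then
          let found := pvDirs.foldl (fun fd dir =>
            let nr := rp.1 + dir.1
            let nc := cp.1 + dir.2
            if 0 ≤ nr ∧ nr < (engine_schematic.length : Int) ∧ 0 ≤ nc ∧
                nc < ((rp.2).length : Int) then
              let rowE := PySem.List.pyGetD table nr []
              if nc < (rowE.length : Int) then
                match PySem.List.pyGetD rowE nc none with
                | some t => if t ∈ fd then fd else fd ++ [t]
                | none => fd
              else fd
            else fd) []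
          if found.isEmpty then d else PySem.Dict.insert d (rp.1, cp.1) (PySem.Set.ofList found)
        else d) d)
      PySem.Dict.empty).items).map (fun q => (q.1.1, q.1.2, q.2))

-- ===== PRECONDITION & SPEC =====

def pvLastDigit (row : List String) : Bool :=
  match row.getLast? with
  | some s => PySem.Str.strIsdigit s
  | none => false

-- Pre_ excludes the inputs where A's indexing leaves the intended grid: stars whose in-bounds
-- neighbour index falls beyond its own shorter row (A raises IndexError on such ragged grids),
-- and star-adjacent digit runs touching column 0 of a row whose last cell is a digit — there
-- Python's negative-index wraparound makes A raise ValueError on int('') or, when that row is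
-- all digits, return an accidental (int(last cell), -1, row) triple no caller could intend.
def Pre_build_numbers_from_starting_positions_py (engine_schematic : List (List String)) : Prop :=
  ((List.range engine_schematic.length).all (fun r =>
    (List.range (engine_schematic.getD r []).length).all (fun c =>
      !((engine_schematic.getD r []).getD c "" == "*") ||
      (List.range engine_schematic.length).all (fun nr =>
        (List.range (engine_schematic.getD r []).length).all (fun nc =>
          !(decide (r ≤ nr + 1 ∧ nr ≤ r + 1 ∧ c ≤ nc + 1 ∧ nc ≤ c + 1 ∧ (nr ≠ r ∨ nc ≠ c))) ||
          (decide (nc < (engine_schematic.getD nr []).length) &&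
           (!(PySem.Str.strIsdigit ((engine_schematic.getD nr []).getD nc "")) ||
            !(((engine_schematic.getD nr []).take (nc + 1)).all PySem.Str.strIsdigit &&
              pvLastDigit (engine_schematic.getD nr [])))))))))  = true

instance (engine_schematic : List (List String)) :
    Decidable (Pre_build_numbers_from_starting_positions_py engine_schematic) := by
  unfold Pre_build_numbers_from_starting_positions_py; infer_instance

def pvWitness_build_numbers_from_starting_positions_py : List (List String) := [[".", "*", "1"]]

def Spec_build_numbers_from_starting_positions_py (engine_schematic : List (List String))
    (out : List (Int × Int × List (Int × Int × Int))) : Prop :=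
  out = build_numbers_from_starting_positions_py_alt engine_schematic

instance (engine_schematic : List (List String)) (out : List (Int × Int × List (Int × Int × Int))) :
    Decidable (Spec_build_numbers_from_starting_positions_py engine_schematic out) := by
  unfold Spec_build_numbers_from_starting_positions_py; infer_instance

-- ===== CLAIM (what is proved, stated in full; the proofs are below) =====

def Claim_equal_build_numbers_from_starting_positions_py : Prop :=
  ∀ (engine_schematic : List (List String)),
    Dom_build_numbers_from_starting_positions_py engine_schematic →
    Pre_build_numbers_from_starting_positions_py engine_schematic →
    Spec_build_numbers_from_starting_positions_py engine_schematic
      (build_numbers_from_starting_positions_py engine_schematic)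
-- ===== LEMMAS AND PROOFS =====
-- ===== LEMMAS AND PROOFS =====

-- ---- run-stop scan (B's inner while loop) ----

theorem pvRunStopAux_stuck (row : List String) (fuel c : Nat)
    (h : ¬(c < row.length ∧ pvDigit (row.getD c "") = true)) :
    pvRunStopAux row fuel c = c := by
  cases fuel with
  | zero => rfl
  | succ f => show (if c < row.length ∧ pvDigit (row.getD c "") = true then _ else c) = c
              rw [if_neg h]

theorem pvRunStopAux_ge (row : List String) (fuel : Nat) :
    ∀ c, c ≤ pvRunStopAux row fuel c := by
  induction fuel with
  | zero => intro c; simp [pvRunStopAux]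
  | succ f ih =>
    intro c
    unfold pvRunStopAux
    split
    · exact le_trans (by omega) (ih (c + 1))
    · exact le_rfl

theorem pvRunStopAux_congr (row : List String) :
    ∀ f g c, row.length ≤ f + c → row.length ≤ g + c →
      pvRunStopAux row f c = pvRunStopAux row g c := by
  intro f
  induction f with
  | zero =>
    intro g c hf hg
    have h : ¬(c < row.length ∧ pvDigit (row.getD c "") = true) := by
      intro ⟨h1, _⟩; omega
    rw [pvRunStopAux_stuck row g c h]
    rfl
  | succ f ih =>
    intro g c hf hg
    by_cases h : c < row.length ∧ pvDigit (row.getD c "") = true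
    · cases g with
      | zero => omega
      | succ g =>
        show (if c < row.length ∧ pvDigit (row.getD c "") = true then pvRunStopAux row f (c+1) else c)
           = (if c < row.length ∧ pvDigit (row.getD c "") = true then pvRunStopAux row g (c+1) else c)
        rw [if_pos h, if_pos h]
        exact ih g (c + 1) (by omega) (by omega)
    · rw [pvRunStopAux_stuck row _ c h, pvRunStopAux_stuck row _ c h]

theorem pvRunStop_ge (row : List String) (c : Nat) : c ≤ pvRunStop row c :=
  pvRunStopAux_ge row row.length c

theorem pvRunStop_succ (row : List String) (c : Nat) (h : c < row.length)
    (hd : pvDigit (row.getD c "") = true) :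
    pvRunStop row c = pvRunStop row (c + 1) := by
  unfold pvRunStop
  rw [pvRunStopAux_congr row row.length (row.length + 1) c (by omega) (by omega)]
  show (if c < row.length ∧ pvDigit (row.getD c "") = true then pvRunStopAux row row.length (c+1) else c)
     = pvRunStopAux row row.length (c + 1)
  rw [if_pos ⟨h, hd⟩]

theorem pvRunStop_gt (row : List String) (c : Nat) (h : c < row.length)
    (hd : pvDigit (row.getD c "") = true) : c < pvRunStop row c := by
  rw [pvRunStop_succ row c h hd]
  have := pvRunStop_ge row (c + 1)
  omega

theorem pvRunStopAux_le (row : List String) :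
    ∀ fuel c, c ≤ row.length → pvRunStopAux row fuel c ≤ row.length := by
  intro fuel
  induction fuel with
  | zero => intro c hc; simpa [pvRunStopAux] using hc
  | succ f ih =>
    intro c hc
    unfold pvRunStopAux
    split
    · exact ih (c + 1) (by omega)
    · exact hc

theorem pvRunStop_le (row : List String) (c : Nat) (hc : c ≤ row.length) :
    pvRunStop row c ≤ row.length :=
  pvRunStopAux_le row row.length c hc

theorem pvRunStopAux_digits (row : List String) :
    ∀ fuel c k, c ≤ k → k < pvRunStopAux row fuel c → pvDigit (row.getD k "") = true := by
  intro fuel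
  induction fuel with
  | zero => intro c k h1 h2; simp [pvRunStopAux] at h2; omega
  | succ f ih =>
    intro c k h1 h2
    unfold pvRunStopAux at h2
    split at h2
    · rename_i h
      rcases Nat.eq_or_lt_of_le h1 with h' | h'
      · exact h' ▸ h.2
      · exact ih (c + 1) k h' h2
    · omega

theorem pvRunStop_digits (row : List String) (c k : Nat) (h1 : c ≤ k)
    (h2 : k < pvRunStop row c) : pvDigit (row.getD k "") = true :=
  pvRunStopAux_digits row row.length c k h1 h2

theorem pvRunStopAux_notdigit (row : List String) :
    ∀ fuel c, row.length ≤ fuel + c → pvRunStopAux row fuel c < row.length →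
      pvDigit (row.getD (pvRunStopAux row fuel c) "") = false := by
  intro fuel
  induction fuel with
  | zero => intro c hf h; simp [pvRunStopAux] at h ⊢; omega
  | succ f ih =>
    intro c hf h
    by_cases hc : c < row.length ∧ pvDigit (row.getD c "") = true
    · have he : pvRunStopAux row (f+1) c = pvRunStopAux row f (c+1) := by
        show (if c < row.length ∧ pvDigit (row.getD c "") = true then pvRunStopAux row f (c+1) else c)
           = pvRunStopAux row f (c + 1)
        rw [if_pos hc]
      rw [he] at h ⊢
      exact ih (c + 1) (by omega) h
    · rw [pvRunStopAux_stuck row _ c hc] at h ⊢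
      rcases Bool.eq_false_or_eq_true (pvDigit (row.getD c "")) with h' | h'
      · exact absurd ⟨h, h'⟩ hc
      · exact h'

theorem pvRunStop_notdigit (row : List String) (c : Nat)
    (h : pvRunStop row c < row.length) :
    pvDigit (row.getD (pvRunStop row c) "") = false :=
  pvRunStopAux_notdigit row row.length c (by omega) h

theorem pvRunStop_eq_of_digits (row : List String) :
    ∀ n a b, b - a = n → a ≤ b → b < row.length →
      (∀ k, a ≤ k → k ≤ b → pvDigit (row.getD k "") = true) →
      pvRunStop row a = pvRunStop row b := by
  intro n
  induction n with
  | zero =>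
    intro a b h _ _ _
    have : a = b := by omega
    rw [this]
  | succ n ih =>
    intro a b h hab hb hd
    have ha : a < b := by omega
    rw [pvRunStop_succ row a (by omega) (hd a le_rfl (by omega))]
    exact ih (a + 1) b (by omega) (by omega) hb (fun k h1 h2 => hd k (by omega) h2)

-- ---- A's right while loop vs the run stop ----

theorem pvGoRightAux_rs (row : List String) :
    ∀ fuel k, pvGoRightAux row fuel k + 1 = pvRunStopAux row fuel (k + 1) := by
  intro fuel
  induction fuel with
  | zero => intro k; simp [pvGoRightAux, pvRunStopAux]
  | succ f ih =>
    intro k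
    show (if k + 1 < row.length ∧ pvDigit (PySem.List.pyGetD row ((k : Int) + 1) "") = true then
            pvGoRightAux row f (k + 1) else k) + 1
        = (if k + 1 < row.length ∧ pvDigit (row.getD (k + 1) "") = true then
            pvRunStopAux row f (k + 2) else k + 1)
    have hcast : ((k : Int) + 1) = ((k + 1 : Nat) : Int) := by push_cast; ring
    rw [hcast, PySem.List.pyGetD_natCast]
    split
    · exact ih (k + 1)
    · rfl

theorem pvGoRight_succ (row : List String) (k : Nat) :
    pvGoRight row k + 1 = pvRunStop row (k + 1) :=
  pvGoRightAux_rs row row.length k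

theorem pvGoRight_eq (row : List String) (c : Nat) (h : c < row.length)
    (hd : pvDigit (row.getD c "") = true) :
    pvGoRight row c + 1 = pvRunStop row c := by
  rw [pvGoRight_succ, pvRunStop_succ row c h hd]

-- ---- run starts (proof-only characterisation of A's left scan) ----

def nfRunStart (row : List String) : Nat → Nat
  | 0 => 0
  | k+1 => if pvDigit (row.getD k "") = true then nfRunStart row k else k + 1

theorem nfRunStart_succ (row : List String) (n : Nat) :
    nfRunStart row (n + 1) = if pvDigit (row.getD n "") = true then nfRunStart row n else n + 1 :=
  rfl

theorem nfRunStart_le (row : List String) : ∀ c, nfRunStart row c ≤ c := by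
  intro c
  induction c with
  | zero => exact le_rfl
  | succ k ih =>
    unfold nfRunStart
    split
    · omega
    · exact le_rfl

theorem nfRunStart_digits (row : List String) :
    ∀ c, pvDigit (row.getD c "") = true →
      ∀ k, nfRunStart row c ≤ k → k ≤ c → pvDigit (row.getD k "") = true := by
  intro c
  induction c with
  | zero =>
    intro hd k h1 h2
    have : k = 0 := by omega
    exact this ▸ hd
  | succ n ih =>
    intro hd k h1 h2
    by_cases hn : pvDigit (row.getD n "") = true
    · rw [nfRunStart_succ, if_pos hn] at h1
      rcases Nat.eq_or_lt_of_le h2 with h' | h'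
      · exact h' ▸ hd
      · exact ih hn k h1 (by omega)
    · rw [nfRunStart_succ, if_neg hn] at h1
      have : k = n + 1 := by omega
      exact this ▸ hd

theorem nfRunStart_boundary (row : List String) (c : Nat) :
    nfRunStart row c = 0 ∨ pvDigit (row.getD (nfRunStart row c - 1) "") = false := by
  induction c with
  | zero => exact Or.inl rfl
  | succ n ih =>
    rw [nfRunStart_succ]
    split
    · exact ih
    · rename_i hn
      right
      simpa using Bool.eq_false_iff.mpr (fun h => hn h)

-- the run start of a star-adjacent digit cell, as computed from the table invariants
theorem nfRunStart_run (row : List String) (c0 c : Nat) (h0 : c0 ≤ c) (hc : c < row.length)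
    (hd0 : pvDigit (row.getD c0 "") = true) (hlt : c < pvRunStop row c0)
    (hinv : c0 ≤ nfRunStart row c) : nfRunStart row c = c0 := by
  have hdc : pvDigit (row.getD c "") = true := pvRunStop_digits row c0 c h0 hlt
  have hle := nfRunStart_le row c
  rcases Nat.eq_or_lt_of_le hinv with h' | h'
  · omega
  · exfalso
    rcases nfRunStart_boundary row c with hb | hb
    · omega
    · have : pvDigit (row.getD (nfRunStart row c - 1) "") = true :=
        pvRunStop_digits row c0 (nfRunStart row c - 1) (by omega) (by omega)
      rw [hb] at this; exact absurd this (by simp)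

-- ---- A's left while loop in terms of run starts ----

theorem pvGoLeft_eq (row : List String) :
    ∀ c, c < row.length → pvDigit (row.getD c "") = true →
      pvGoLeft row c =
        if nfRunStart row c = 0 ∧ pvLastDigit row = true then (-1 : Int)
        else (nfRunStart row c : Int) := by
  intro c
  induction c with
  | zero =>
    intro hc hd
    have hne : row ≠ [] := by intro h; rw [h] at hc; simp at hc
    show (if pvDigit (PySem.List.pyGetD row (-1) "") = true then (-1 : Int) else 0) = _
    rw [PySem.List.pyGetD_neg_one row "" hne]
    have hlast : pvLastDigit row = pvDigit (row.getLast hne) := by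
      unfold pvLastDigit
      rw [List.getLast?_eq_some_getLast hne]
      rfl
    have h0 : nfRunStart row 0 = 0 := rfl
    rw [h0, hlast]
    simp
  | succ k ih =>
    intro hc hd
    show (if pvDigit (PySem.List.pyGetD row (k : Int) "") = true then pvGoLeft row k
          else ((k : Int) + 1)) = _
    rw [PySem.List.pyGetD_natCast]
    by_cases hk : pvDigit (row.getD k "") = true
    · rw [if_pos hk, nfRunStart_succ, if_pos hk]
      exact ih (by omega) hk
    · rw [if_neg hk, nfRunStart_succ, if_neg hk]
      rw [if_neg (by omega)]
      push_cast; ring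

-- ---- B's table rows: length and per-cell contents ----

theorem pvRowEntriesAux_len (row : List String) (r : Int) :
    ∀ fuel c, row.length ≤ fuel + c → c ≤ row.length →
      (pvRowEntriesAux row r fuel c).length = row.length - c := by
  intro fuel
  induction fuel with
  | zero =>
    intro c hf hc
    show ([] : List (Option (Int × Int × Int))).length = row.length - c
    simp; omega
  | succ f ih =>
    intro c hf hc
    by_cases hcl : c < row.length
    · rw [show pvRowEntriesAux row r (f+1) c =
          (if c < row.length then
            (if pvDigit (row.getD c "") = true then
              List.replicate (pvRunStop row c - c)
                (some ((PySem.Int.ofStr? (PySem.Str.join ""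
                        (PySem.List.slice row (some (c : Int)) (some (pvRunStop row c : Int))))).getD 0,
                       (c : Int), r))
                ++ pvRowEntriesAux row r f (pvRunStop row c)
            else none :: pvRowEntriesAux row r f (c + 1))
          else []) from rfl]
      rw [if_pos hcl]
      by_cases hd : pvDigit (row.getD c "") = true
      · rw [if_pos hd]
        have hgt := pvRunStop_gt row c hcl hd
        have hle := pvRunStop_le row c (by omega)
        rw [List.length_append, List.length_replicate,
            ih (pvRunStop row c) (by omega) hle]
        omega
      · rw [if_neg hd]
        rw [List.length_cons, ih (c + 1) (by omega) (by omega)]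
        omega
    · rw [show pvRowEntriesAux row r (f+1) c =
          (if c < row.length then _ else ([] : List (Option (Int × Int × Int)))) from rfl,
          if_neg hcl]
      simp; omega

theorem pvRowEntries_len (row : List String) (r : Int) :
    (pvRowEntries row r).length = row.length :=
  by simpa using pvRowEntriesAux_len row r row.length 0 (by omega) (by omega)

theorem pvRowEntriesAux_get (row : List String) (r : Int) :
    ∀ fuel c0 c, row.length ≤ fuel + c0 → c0 ≤ c → c < row.length →
      (pvDigit (row.getD c "") = true → c0 ≤ nfRunStart row c) →
      (pvRowEntriesAux row r fuel c0).getD (c - c0) none =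
        if pvDigit (row.getD c "") = true then
          some ((PySem.Int.ofStr? (PySem.Str.join ""
                  (PySem.List.slice row (some (nfRunStart row c : Int))
                    (some (pvRunStop row (nfRunStart row c) : Int))))).getD 0,
                (nfRunStart row c : Int), r)
        else none := by
  intro fuel
  induction fuel with
  | zero => intro c0 c hf h0 hc _; omega
  | succ f ih =>
    intro c0 c hf h0 hc hinv
    have hc0l : c0 < row.length := by omega
    rw [show pvRowEntriesAux row r (f+1) c0 =
        (if c0 < row.length then
          (if pvDigit (row.getD c0 "") = true then
            List.replicate (pvRunStop row c0 - c0)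
              (some ((PySem.Int.ofStr? (PySem.Str.join ""
                      (PySem.List.slice row (some (c0 : Int)) (some (pvRunStop row c0 : Int))))).getD 0,
                     (c0 : Int), r))
              ++ pvRowEntriesAux row r f (pvRunStop row c0)
          else none :: pvRowEntriesAux row r f (c0 + 1))
        else []) from rfl]
    rw [if_pos hc0l]
    by_cases hd0 : pvDigit (row.getD c0 "") = true
    · rw [if_pos hd0]
      set stop := pvRunStop row c0 with hstop
      have hgt : c0 < stop := pvRunStop_gt row c0 hc0l hd0
      have hstople : stop ≤ row.length := pvRunStop_le row c0 (by omega)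
      by_cases hcs : c < stop
      · -- inside the replicate block
        have hdc : pvDigit (row.getD c "") = true := pvRunStop_digits row c0 c h0 hcs
        have hidx : c - c0 < stop - c0 := by omega
        rw [List.getD_append _ _ _ _ ?hside]
        case hside => rw [List.length_replicate]; exact hidx
        rw [List.getD_replicate _ hidx]
        have hrs : nfRunStart row c = c0 :=
          nfRunStart_run row c0 c h0 hc hd0 hcs (hinv hdc)
        rw [if_pos hdc, hrs]
      · -- past the run: recurse at stop
        have hlenrep : (List.replicate (stop - c0)
            (some ((PySem.Int.ofStr? (PySem.Str.join ""
                    (PySem.List.slice row (some (c0 : Int)) (some (stop : Int))))).getD 0,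
                   (c0 : Int), r))).length = stop - c0 := List.length_replicate
        have hsc : stop ≤ c := Nat.le_of_not_lt hcs
        rw [List.getD_append_right _ _ _ _ (by rw [List.length_replicate]; exact Nat.sub_le_sub_right hsc c0)]
        rw [hlenrep]
        have harith : c - c0 - (stop - c0) = c - stop := by omega
        rw [harith]
        apply ih stop c (by omega) (by omega) hc
        intro hdc
        by_contra hlt
        push_neg at hlt
        have hsle : nfRunStart row c ≤ stop - 1 := by omega
        have : pvDigit (row.getD stop "") = true := by
          apply nfRunStart_digits row c hdc stop (by omega) (by omega)
        have hnd : pvDigit (row.getD stop "") = false :=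
          pvRunStop_notdigit row c0 (by omega)
        rw [hnd] at this; exact Bool.noConfusion this
    · rw [if_neg hd0]
      rcases Nat.eq_or_lt_of_le h0 with h' | h'
      · subst h'
        simp only [Nat.sub_self, List.getD_cons_zero]
        rw [if_neg hd0]
      · have harith : c - c0 = (c - (c0 + 1)) + 1 := by omega
        rw [harith, List.getD_cons_succ]
        apply ih (c0 + 1) c (by omega) (by omega) hc
        intro hdc
        have h1 : c0 ≤ nfRunStart row c := hinv hdc
        rcases Nat.eq_or_lt_of_le h1 with h'' | h''
        · exfalso
          have : pvDigit (row.getD c0 "") = true := by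
            apply nfRunStart_digits row c hdc c0 (by omega) (by omega)
          exact hd0 this
        · omega

theorem pvRowEntries_get (row : List String) (r : Int) (c : Nat) (hc : c < row.length) :
    (pvRowEntries row r).getD c none =
      if pvDigit (row.getD c "") = true then
        some ((PySem.Int.ofStr? (PySem.Str.join ""
                (PySem.List.slice row (some (nfRunStart row c : Int))
                  (some (pvRunStop row (nfRunStart row c) : Int))))).getD 0,
              (nfRunStart row c : Int), r)
      else none := by
  simpa using pvRowEntriesAux_get row r row.length 0 c (by omega) (by omega) hc (fun _ => by omega)

-- ---- normal form: stars, per-star triple lists, and dictionary grouping ----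

def nfStars (es : List (List String)) : List (Nat × Nat) :=
  (List.range es.length).flatMap (fun r =>
    (List.range (es.getD r []).length).flatMap (fun c =>
      if ((es.getD r []).getD c "" == "*") = true then [(r, c)] else []))

def nfTrips (es : List (List String)) (s : Nat × Nat) : List (Int × Int × Int) :=
  pvDirs.filterMap (fun d =>
    if (s.1 : Int) + d.1 < 0 ∨ (s.1 : Int) + d.1 ≥ (es.length : Int) ∨
        (s.2 : Int) + d.2 < 0 ∨
        (s.2 : Int) + d.2 ≥ ((es.getD s.1 []).length : Int) then none
    else if pvDigit (PySem.List.pyGetD (PySem.List.pyGetD es ((s.1 : Int) + d.1) [])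
        ((s.2 : Int) + d.2) "") then
      some (pvBuildNum es ((s.1 : Int) + d.1) ((s.2 : Int) + d.2))
    else none)

theorem nfStars_mem (es : List (List String)) (s : Nat × Nat) :
    s ∈ nfStars es ↔ s.1 < es.length ∧ s.2 < (es.getD s.1 []).length ∧
      ((es.getD s.1 []).getD s.2 "" == "*") = true := by
  unfold nfStars
  simp only [List.mem_flatMap, List.mem_range]
  constructor
  · rintro ⟨r, hr, c, hc, hmem⟩
    split at hmem
    · rename_i hstar
      simp at hmem
      rw [hmem]
      exact ⟨hr, hc, hstar⟩
    · simp at hmem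
  · rintro ⟨h1, h2, h3⟩
    exact ⟨s.1, h1, s.2, h2, by rw [if_pos h3]; simp⟩

theorem nfStars_nodup (es : List (List String)) : (nfStars es).Nodup := by
  unfold nfStars
  rw [List.nodup_flatMap]
  constructor
  · intro r _
    rw [List.nodup_flatMap]
    refine ⟨fun c _ => by split <;> simp, ?_⟩
    apply List.Pairwise.imp ?_ (List.pairwise_lt_range)
    intro c1 c2 hlt x hx1 hx2
    simp at hx1 hx2
    obtain ⟨_, hx1⟩ := hx1
    obtain ⟨_, hx2⟩ := hx2
    rw [hx1] at hx2
    have := congrArg Prod.snd hx2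
    simp at this
    omega
  · apply List.Pairwise.imp ?_ (List.pairwise_lt_range)
    intro r1 r2 hlt x hx1 hx2
    simp only [List.mem_flatMap, List.mem_range] at hx1 hx2
    obtain ⟨c1, _, hm1⟩ := hx1
    obtain ⟨c2, _, hm2⟩ := hx2
    simp at hm1 hm2
    obtain ⟨_, hm1⟩ := hm1
    obtain ⟨_, hm2⟩ := hm2
    rw [hm1] at hm2
    have := congrArg Prod.fst hm2
    simp at this
    omega

theorem nfStars_key_nodup (es : List (List String)) :
    ((nfStars es).map (fun s => ((s.1 : Int), (s.2 : Int)))).Nodup := by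
  apply List.Nodup.map ?_ (nfStars_nodup es)
  intro a b hab
  have h1 := congrArg Prod.fst hab
  have h2 := congrArg Prod.snd hab
  simp at h1 h2
  exact Prod.ext h1 h2

-- grouping with a constant key: the defaultdict(set).add loop is a single insert
theorem pvFoldConstKey (ts : List (Int × Int × Int)) :
    ∀ (k : Int × Int) (d : PySem.Dict (Int × Int) (PySem.Set (Int × Int × Int))), ts ≠ [] →
      ts.foldl (fun d t =>
          PySem.Dict.modify d k PySem.Set.empty (fun s => PySem.Set.add s t)) d
        = PySem.Dict.insert d k
            (ts.foldl PySem.Set.add (PySem.Dict.getD d k PySem.Set.empty)) := by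
  induction ts with
  | nil => intro k d h; exact absurd rfl h
  | cons t ts ih =>
    intro k d _
    cases ts with
    | nil => rfl
    | cons t2 ts2 =>
      have hmod : PySem.Dict.modify d k PySem.Set.empty (fun s => PySem.Set.add s t)
          = PySem.Dict.insert d k (PySem.Set.add (PySem.Dict.getD d k PySem.Set.empty) t) := rfl
      rw [List.foldl_cons, hmod, ih k _ (by simp), PySem.Dict.getD_insert_self,
          PySem.Dict.insert_insert_self]
      rfl

-- A's whole grouping loop over the star list
theorem pvGroupA (es : List (List String)) (tr : (Nat × Nat) → List (Int × Int × Int)) :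
    ∀ (S : List (Nat × Nat)) (d : PySem.Dict (Int × Int) (PySem.Set (Int × Int × Int))),
      d.keys.Nodup →
      (S.map (fun s => ((s.1 : Int), (s.2 : Int)))).Nodup →
      (∀ s ∈ S, d.contains ((s.1 : Int), (s.2 : Int)) = false) →
      (S.foldl (fun d s =>
          (tr s).foldl (fun d t =>
            PySem.Dict.modify d ((s.1 : Int), (s.2 : Int)) PySem.Set.empty
              (fun st => PySem.Set.add st t)) d) d).items
        = d.items ++ S.filterMap (fun s =>
            if tr s = [] then none
            else some (((s.1 : Int), (s.2 : Int)), PySem.Set.ofList (tr s))) := by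
  intro S
  induction S with
  | nil => intro d _ _ _; simp
  | cons s S ih =>
    intro d hnd hmap hfresh
    rw [List.map_cons, List.nodup_cons] at hmap
    obtain ⟨hnotmem, hmaptail⟩ := hmap
    rw [List.foldl_cons, List.filterMap_cons]
    by_cases hts : tr s = []
    · rw [hts]
      rw [if_pos rfl]
      exact ih d hnd hmaptail (fun s' hs' => hfresh s' (List.mem_cons_of_mem s hs'))
    · rw [pvFoldConstKey (tr s) _ d hts]
      rw [PySem.Dict.getD_of_not_contains d _ (hfresh s (List.mem_cons_self))]
      have hofl : (tr s).foldl PySem.Set.add PySem.Set.empty = PySem.Set.ofList (tr s) :=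
        (PySem.Set.ofList_eq_foldl (tr s)).symm
      rw [hofl, if_neg hts]
      rw [ih _ (PySem.Dict.nodup_keys_insert d _ _ hnd) hmaptail
            (fun s' hs' => by
              rw [PySem.Dict.contains_insert]
              have hne : ¬ ((s'.1 : Int), (s'.2 : Int)) = ((s.1 : Int), (s.2 : Int)) := by
                intro he
                exact hnotmem (by rw [← he]; exact List.mem_map_of_mem hs')
              simp [hne, hfresh s' (List.mem_cons_of_mem s hs')])]
      rw [PySem.Dict.items_insert_of_not_contains d _ (hfresh s (List.mem_cons_self))]
      simp

-- B's grouping loop over the star list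
theorem pvGroupB (es : List (List String)) (fn : (Nat × Nat) → List (Int × Int × Int)) :
    ∀ (S : List (Nat × Nat)) (d : PySem.Dict (Int × Int) (PySem.Set (Int × Int × Int))),
      d.keys.Nodup →
      (S.map (fun s => ((s.1 : Int), (s.2 : Int)))).Nodup →
      (∀ s ∈ S, d.contains ((s.1 : Int), (s.2 : Int)) = false) →
      (S.foldl (fun d s =>
          if (fn s).isEmpty then d
          else PySem.Dict.insert d ((s.1 : Int), (s.2 : Int)) (PySem.Set.ofList (fn s))) d).items
        = d.items ++ S.filterMap (fun s =>
            if fn s = [] then none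
            else some (((s.1 : Int), (s.2 : Int)), PySem.Set.ofList (fn s))) := by
  intro S
  induction S with
  | nil => intro d _ _ _; simp
  | cons s S ih =>
    intro d hnd hmap hfresh
    rw [List.map_cons, List.nodup_cons] at hmap
    obtain ⟨hnotmem, hmaptail⟩ := hmap
    rw [List.foldl_cons, List.filterMap_cons]
    by_cases hts : fn s = []
    · rw [if_pos (by simp [hts]), if_pos hts]
      exact ih d hnd hmaptail (fun s' hs' => hfresh s' (List.mem_cons_of_mem s hs'))
    · rw [if_neg (by simp [hts]), if_neg hts]
      rw [ih _ (PySem.Dict.nodup_keys_insert d _ _ hnd) hmaptail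
            (fun s' hs' => by
              rw [PySem.Dict.contains_insert]
              have hne : ¬ ((s'.1 : Int), (s'.2 : Int)) = ((s.1 : Int), (s.2 : Int)) := by
                intro he
                exact hnotmem (by rw [← he]; exact List.mem_map_of_mem hs')
              simp [hne, hfresh s' (List.mem_cons_of_mem s hs')])]
      rw [PySem.Dict.items_insert_of_not_contains d _ (hfresh s (List.mem_cons_self))]
      simp

-- B's per-star direction loop is an ordered dedup of the lookups
theorem pvFoundFold (look : (Int × Int) → Option (Int × Int × Int)) :
    ∀ (dirs : List (Int × Int)) (s0 : List (Int × Int × Int)),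
      dirs.foldl (fun fd dir =>
        match look dir with
        | some t => if t ∈ fd then fd else fd ++ [t]
        | none => fd) s0
      = PySem.Set.update s0 (dirs.filterMap look) := by
  intro dirs
  induction dirs with
  | nil => intro s0; simp [PySem.Set.update]
  | cons dcur rest ih =>
    intro s0
    cases hl : look dcur with
    | none =>
      rw [List.foldl_cons, List.filterMap_cons, hl]
      exact ih s0
    | some t =>
      rw [List.foldl_cons, List.filterMap_cons, hl]
      rw [ih, PySem.Set.update_cons]
      congr 1
      rw [PySem.Set.add_eq_ite]

-- folding the star scan is folding the row-major grid scan
theorem pvGridFold (es : List (List String))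
    (f : PySem.Dict (Int × Int) (PySem.Set (Int × Int × Int)) → Nat → Nat →
         PySem.Dict (Int × Int) (PySem.Set (Int × Int × Int)))
    (d : PySem.Dict (Int × Int) (PySem.Set (Int × Int × Int))) :
    (nfStars es).foldl (fun d s => f d s.1 s.2) d
      = (List.range es.length).foldl (fun d r =>
          (List.range (es.getD r []).length).foldl (fun d c =>
            if ((es.getD r []).getD c "" == "*") = true then f d r c else d) d) d := by
  unfold nfStars
  rw [List.foldl_flatMap]
  apply PySem.List.foldl_congr_mem
  intro acc r _
  rw [List.foldl_flatMap]
  apply PySem.List.foldl_congr_mem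
  intro acc2 c _
  by_cases h : ((es.getD r []).getD c "" == "*") = true
  · rw [if_pos h, if_pos h]
    rfl
  · rw [if_neg h, if_neg h]
    rfl

-- ---- B's per-direction lookup, named for the proofs ----

def blook (es : List (List String)) (s : Nat × Nat) (dd : Int × Int) :
    Option (Int × Int × Int) :=
  if 0 ≤ (s.1 : Int) + dd.1 ∧ (s.1 : Int) + dd.1 < (es.length : Int) ∧
      0 ≤ (s.2 : Int) + dd.2 ∧ (s.2 : Int) + dd.2 < ((es.getD s.1 []).length : Int) then
    if (s.2 : Int) + dd.2 < ((PySem.List.pyGetD (pvTableOf es) ((s.1 : Int) + dd.1) []).length : Int) then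
      PySem.List.pyGetD (PySem.List.pyGetD (pvTableOf es) ((s.1 : Int) + dd.1) [])
        ((s.2 : Int) + dd.2) none
    else none
  else none

def bfound (es : List (List String)) (s : Nat × Nat) : List (Int × Int × Int) :=
  PySem.Set.ofList (pvDirs.filterMap (blook es s))

theorem pvTableOf_getD (es : List (List String)) (j : Nat) (hj : j < es.length) :
    PySem.List.pyGetD (pvTableOf es) (j : Int) [] = pvRowEntries (es.getD j []) (j : Int) := by
  unfold pvTableOf
  rw [PySem.List.enumerate_eq_map_pyRange es [], PySem.List.len_eq,
      PySem.List.pyRange_zero_natCast, PySem.List.pyGetD_natCast, List.map_map, List.map_map]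
  rw [PySem.List.getD_map_range _ _ _ _ hj]
  simp [PySem.List.pyGetD_natCast]

-- every direction offset is an adjacency step
theorem pvDirs_bounds (dd : Int × Int) (hd : dd ∈ pvDirs) :
    -1 ≤ dd.1 ∧ dd.1 ≤ 1 ∧ -1 ≤ dd.2 ∧ dd.2 ≤ 1 ∧ ¬(dd.1 = 0 ∧ dd.2 = 0) := by
  fin_cases hd <;> simp

theorem pvDigit_eq : PySem.Str.strIsdigit = pvDigit := rfl

-- ---- extracting the Pre_ and D_ clauses for one star and one direction ----

theorem pre_clause (es : List (List String))
    (hpre : Pre_build_numbers_from_starting_positions_py es)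
    (r c : Nat) (dd : Int × Int) (hr : r < es.length) (hc : c < (es.getD r []).length)
    (hstar : ((es.getD r []).getD c "" == "*") = true)
    (hd : dd ∈ pvDirs)
    (h1 : 0 ≤ (r : Int) + dd.1) (h2 : (r : Int) + dd.1 < (es.length : Int))
    (h3 : 0 ≤ (c : Int) + dd.2) (h4 : (c : Int) + dd.2 < ((es.getD r []).length : Int)) :
    (((c : Int) + dd.2).toNat < (es.getD (((r : Int) + dd.1).toNat) []).length) ∧
    (pvDigit ((es.getD (((r : Int) + dd.1).toNat) []).getD (((c : Int) + dd.2).toNat) "") = true →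
      ¬(((es.getD (((r : Int) + dd.1).toNat) []).take ((((c : Int) + dd.2).toNat) + 1)).all pvDigit = true ∧
        pvLastDigit (es.getD (((r : Int) + dd.1).toNat) []) = true)) := by
  have hdd := pvDirs_bounds dd hd
  unfold Pre_build_numbers_from_starting_positions_py at hpre
  simp only [pvDigit_eq] at hpre
  rw [List.all_eq_true] at hpre
  have ha := hpre r (List.mem_range.mpr hr)
  rw [List.all_eq_true] at ha
  have hb := ha c (List.mem_range.mpr hc)
  rw [Bool.or_eq_true] at hb
  rcases hb with hb | hb
  · rw [hstar] at hb; simp at hb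
  · rw [List.all_eq_true] at hb
    have hcl := hb (((r : Int) + dd.1).toNat) (List.mem_range.mpr (by omega))
    rw [List.all_eq_true] at hcl
    have hcl2 := hcl (((c : Int) + dd.2).toNat) (List.mem_range.mpr (by omega))
    rw [Bool.or_eq_true] at hcl2
    rcases hcl2 with hcl2 | hcl2
    · rw [Bool.not_eq_true', decide_eq_false_iff_not] at hcl2
      exfalso
      apply hcl2
      omega
    · simp only [Bool.and_eq_true, decide_eq_true_eq] at hcl2
      refine ⟨hcl2.1, fun hdig => ?_⟩
      rintro ⟨hp, hl⟩
      have h5 := hcl2.2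
      rw [Bool.or_eq_true] at h5
      rcases h5 with h5 | h5
      · rw [Bool.not_eq_true', hdig] at h5; cases h5
      · rw [Bool.not_eq_true'] at h5
        rw [hp, hl] at h5
        cases h5


-- ---- the wraparound cannot happen for admitted star-adjacent digit cells ----

theorem no_wrap (row : List String) (nc : Nat) (hnc : nc < row.length)
    (hdig : pvDigit (row.getD nc "") = true)
    (hnotwrap : ¬(((row.take (nc + 1)).all pvDigit = true) ∧ pvLastDigit row = true)) :
    ¬(nfRunStart row nc = 0 ∧ pvLastDigit row = true) := by
  rintro ⟨h0, hl⟩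
  apply hnotwrap
  refine ⟨?_, hl⟩
  rw [List.all_eq_true]
  intro x hx
  obtain ⟨k, hk, hxk⟩ := List.getElem_of_mem hx
  have hkle : k ≤ nc := by
    have := hk; rw [List.length_take] at this; omega
  rw [List.getElem_take] at hxk
  have hdk := nfRunStart_digits row nc hdig k (by omega) hkle
  rw [List.getD_eq_getElem row "" (by omega)] at hdk
  rw [hxk] at hdk
  exact hdk

theorem pvBuildNum_def (es : List (List String)) (r c : Int) :
    pvBuildNum es r c =
      ((PySem.Int.ofStr? (PySem.Str.join ""
          (PySem.List.slice (PySem.List.pyGetD es r [])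
            (some (pvGoLeft (PySem.List.pyGetD es r []) c.toNat))
            (some ((pvGoRight (PySem.List.pyGetD es r []) c.toNat : Nat) + 1))))).getD 0,
       pvGoLeft (PySem.List.pyGetD es r []) c.toNat, r) := rfl

-- ---- per-direction: B's table lookup computes exactly A's neighbour expansion ----

theorem look_eq (es : List (List String))
    (hpre : Pre_build_numbers_from_starting_positions_py es)
    (s : Nat × Nat) (hr : s.1 < es.length) (hc : s.2 < (es.getD s.1 []).length)
    (hstar : ((es.getD s.1 []).getD s.2 "" == "*") = true)
    (dd : Int × Int) (hd : dd ∈ pvDirs) :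
    blook es s dd =
      (if (s.1 : Int) + dd.1 < 0 ∨ (s.1 : Int) + dd.1 ≥ (es.length : Int) ∨
          (s.2 : Int) + dd.2 < 0 ∨ (s.2 : Int) + dd.2 ≥ ((es.getD s.1 []).length : Int) then none
       else if pvDigit (PySem.List.pyGetD (PySem.List.pyGetD es ((s.1 : Int) + dd.1) [])
           ((s.2 : Int) + dd.2) "") then
         some (pvBuildNum es ((s.1 : Int) + dd.1) ((s.2 : Int) + dd.2))
       else none) := by
  by_cases hg : 0 ≤ (s.1 : Int) + dd.1 ∧ (s.1 : Int) + dd.1 < (es.length : Int) ∧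
      0 ≤ (s.2 : Int) + dd.2 ∧ (s.2 : Int) + dd.2 < ((es.getD s.1 []).length : Int)
  · -- in-bounds direction
    obtain ⟨h1, h2, h3, h4⟩ := hg
    rw [if_neg (by omega)]
    have hnr : ((((s.1 : Int) + dd.1).toNat : Nat) : Int) = (s.1 : Int) + dd.1 :=
      Int.toNat_of_nonneg h1
    have hncn : ((((s.2 : Int) + dd.2).toNat : Nat) : Int) = (s.2 : Int) + dd.2 :=
      Int.toNat_of_nonneg h3
    set nrn := ((s.1 : Int) + dd.1).toNat with hnrn
    set ncn := ((s.2 : Int) + dd.2).toNat with hncn2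
    set row' := es.getD nrn [] with hrow'
    have hclause := pre_clause es hpre s.1 s.2 dd hr hc hstar hd h1 h2 h3 h4
    have hlen : ncn < row'.length := hclause.1
    have hnrlt : nrn < es.length := by omega
    -- rewrite A's digit test to the Nat-indexed cell
    rw [show PySem.List.pyGetD (PySem.List.pyGetD es ((s.1 : Int) + dd.1) []) ((s.2 : Int) + dd.2) ""
        = row'.getD ncn "" from by
      rw [← hnr, ← hncn, PySem.List.pyGetD_natCast, PySem.List.pyGetD_natCast]]
    -- reduce B's lookup
    unfold blook
    rw [if_pos ⟨h1, h2, h3, h4⟩]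
    rw [show PySem.List.pyGetD (pvTableOf es) ((s.1 : Int) + dd.1) []
        = pvRowEntries row' (nrn : Int) from by
      rw [← hnr, pvTableOf_getD es nrn hnrlt]]
    rw [pvRowEntries_len]
    rw [if_pos (by omega)]
    rw [show PySem.List.pyGetD (pvRowEntries row' (nrn : Int)) ((s.2 : Int) + dd.2) none
        = (pvRowEntries row' (nrn : Int)).getD ncn none from by
      rw [← hncn, PySem.List.pyGetD_natCast]]
    rw [pvRowEntries_get row' (nrn : Int) ncn hlen]
    by_cases hdig : pvDigit (row'.getD ncn "") = true
    · rw [if_pos hdig, if_pos hdig]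
      -- both some: equate the triples
      have hnw : ¬(nfRunStart row' ncn = 0 ∧ pvLastDigit row' = true) :=
        no_wrap row' ncn hlen hdig (hclause.2 hdig)
      set s0 := nfRunStart row' ncn with hs0
      have hL : pvGoLeft row' ncn = (s0 : Int) := by
        rw [pvGoLeft_eq row' ncn hlen hdig, if_neg hnw]
      have hR : pvGoRight row' ncn + 1 = pvRunStop row' ncn :=
        pvGoRight_eq row' ncn hlen hdig
      have hstopEq : pvRunStop row' s0 = pvRunStop row' ncn :=
        pvRunStop_eq_of_digits row' (ncn - s0) s0 ncn rfl (nfRunStart_le row' ncn) hlen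
          (fun k hk1 hk2 => nfRunStart_digits row' ncn hdig k hk1 hk2)
      rw [pvBuildNum_def]
      rw [show PySem.List.pyGetD es ((s.1 : Int) + dd.1) [] = row' from by
        rw [← hnr, PySem.List.pyGetD_natCast]]
      rw [← hncn2]
      rw [hL]
      rw [show ((pvGoRight row' ncn : Nat) : Int) + 1 = ((pvRunStop row' s0 : Nat) : Int) from by
        rw [hstopEq]; omega]
      rw [hnr]
    · rw [if_neg hdig, if_neg hdig]
  · -- out-of-bounds direction: both sides are none
    rw [if_pos (by omega)]
    unfold blook
    rw [if_neg (by simpa using hg)]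

-- ---- assembling port A ----

theorem foldl_if_list {α β : Type} (P : Prop) [Decidable P] (l : List α) (f : β → α → β)
    (acc : β) : (if P then l else []).foldl f acc = if P then l.foldl f acc else acc := by
  split <;> rfl

theorem pvFindAdj_eq (es : List (List String)) :
    pvFindAdj es = (List.range es.length).flatMap (fun r =>
      (List.range (es.getD r []).length).flatMap (fun c =>
        if ((es.getD r []).getD c "" == "*") = true then
          pvDirs.filterMap (fun dd =>
            if (r : Int) + dd.1 < 0 ∨ (r : Int) + dd.1 ≥ (es.length : Int) ∨
                (c : Int) + dd.2 < 0 ∨ (c : Int) + dd.2 ≥ ((es.getD r []).length : Int) then none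
            else if pvDigit (PySem.List.pyGetD (PySem.List.pyGetD es ((r : Int) + dd.1) [])
                ((c : Int) + dd.2) "") then
              some ((r : Int), (c : Int), (r : Int) + dd.1, (c : Int) + dd.2)
            else none)
        else [])) := by
  unfold pvFindAdj
  simp only [PySem.List.pyRange_zero_natCast, List.flatMap_map, PySem.List.pyGetD_natCast]

theorem blockFold (es : List (List String)) (s : Nat × Nat)
    (acc : PySem.Dict (Int × Int) (PySem.Set (Int × Int × Int))) :
    (pvDirs.filterMap (fun dd =>
        if (s.1 : Int) + dd.1 < 0 ∨ (s.1 : Int) + dd.1 ≥ (es.length : Int) ∨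
            (s.2 : Int) + dd.2 < 0 ∨ (s.2 : Int) + dd.2 ≥ ((es.getD s.1 []).length : Int) then none
        else if pvDigit (PySem.List.pyGetD (PySem.List.pyGetD es ((s.1 : Int) + dd.1) [])
            ((s.2 : Int) + dd.2) "") then
          some ((s.1 : Int), (s.2 : Int), (s.1 : Int) + dd.1, (s.2 : Int) + dd.2)
        else none)).foldl
      (fun d p => PySem.Dict.modify d (p.1, p.2.1) PySem.Set.empty
        (fun st => PySem.Set.add st (pvBuildNum es p.2.2.1 p.2.2.2))) acc
    = (nfTrips es s).foldl (fun d t =>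
        PySem.Dict.modify d ((s.1 : Int), (s.2 : Int)) PySem.Set.empty
          (fun st => PySem.Set.add st t)) acc := by
  have hmap : nfTrips es s = (pvDirs.filterMap (fun dd =>
      if (s.1 : Int) + dd.1 < 0 ∨ (s.1 : Int) + dd.1 ≥ (es.length : Int) ∨
          (s.2 : Int) + dd.2 < 0 ∨ (s.2 : Int) + dd.2 ≥ ((es.getD s.1 []).length : Int) then none
      else if pvDigit (PySem.List.pyGetD (PySem.List.pyGetD es ((s.1 : Int) + dd.1) [])
          ((s.2 : Int) + dd.2) "") then
        some ((s.1 : Int), (s.2 : Int), (s.1 : Int) + dd.1, (s.2 : Int) + dd.2)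
      else none)).map (fun p => pvBuildNum es p.2.2.1 p.2.2.2) := by
    unfold nfTrips
    rw [List.map_filterMap]
    apply List.filterMap_congr
    intro dd _
    by_cases h1 : (s.1 : Int) + dd.1 < 0 ∨ (s.1 : Int) + dd.1 ≥ (es.length : Int) ∨
        (s.2 : Int) + dd.2 < 0 ∨ (s.2 : Int) + dd.2 ≥ ((es.getD s.1 []).length : Int)
    · rw [if_pos h1, if_pos h1]; rfl
    · rw [if_neg h1, if_neg h1]
      by_cases h2 : pvDigit (PySem.List.pyGetD (PySem.List.pyGetD es ((s.1 : Int) + dd.1) [])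
          ((s.2 : Int) + dd.2) "") = true
      · rw [if_pos h2, if_pos h2]; rfl
      · rw [if_neg h2, if_neg h2]; rfl
  rw [hmap, List.foldl_map]
  apply PySem.List.foldl_congr_mem
  intro acc2 p hp
  rw [List.mem_filterMap] at hp
  obtain ⟨dd, _, hdd⟩ := hp
  split at hdd
  · cases hdd
  · split at hdd
    · cases hdd; rfl
    · cases hdd

theorem A_items (es : List (List String)) :
    ((pvFindAdj es).foldl (fun d p => PySem.Dict.modify d (p.1, p.2.1) PySem.Set.empty
        (fun st => PySem.Set.add st (pvBuildNum es p.2.2.1 p.2.2.2))) PySem.Dict.empty).items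
    = (nfStars es).filterMap (fun s => if nfTrips es s = [] then none
        else some (((s.1 : Int), (s.2 : Int)), PySem.Set.ofList (nfTrips es s))) := by
  have hdict : (pvFindAdj es).foldl (fun d p => PySem.Dict.modify d (p.1, p.2.1) PySem.Set.empty
        (fun st => PySem.Set.add st (pvBuildNum es p.2.2.1 p.2.2.2))) PySem.Dict.empty
      = (nfStars es).foldl (fun d s => (nfTrips es s).foldl (fun d t =>
          PySem.Dict.modify d ((s.1 : Int), (s.2 : Int)) PySem.Set.empty
            (fun st => PySem.Set.add st t)) d) PySem.Dict.empty := by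
    rw [pvFindAdj_eq, List.foldl_flatMap]
    rw [pvGridFold es (fun d r c => (nfTrips es (r, c)).foldl (fun d t =>
          PySem.Dict.modify d ((r : Int), (c : Int)) PySem.Set.empty
            (fun st => PySem.Set.add st t)) d) PySem.Dict.empty]
    apply PySem.List.foldl_congr_mem
    intro acc r _
    rw [List.foldl_flatMap]
    apply PySem.List.foldl_congr_mem
    intro acc2 c _
    rw [foldl_if_list]
    by_cases hstar : ((es.getD r []).getD c "" == "*") = true
    · rw [if_pos hstar, if_pos hstar]
      exact blockFold es (r, c) acc2
    · rw [if_neg hstar, if_neg hstar]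
  rw [hdict]
  exact pvGroupA es (nfTrips es) (nfStars es) PySem.Dict.empty PySem.Dict.nodup_keys_empty
    (nfStars_key_nodup es) (fun s _ => PySem.Dict.contains_empty _)

-- ---- assembling port B ----

theorem ofList_ne_nil {l : List (Int × Int × Int)} (h : l ≠ []) : PySem.Set.ofList l ≠ [] := by
  obtain ⟨x, hx⟩ := List.exists_mem_of_ne_nil l h
  exact List.ne_nil_of_mem ((PySem.Set.mem_ofList l x).mpr hx)

theorem B_items (es : List (List String)) :
    build_numbers_from_starting_positions_py_alt es
      = ((nfStars es).filterMap (fun s => if bfound es s = [] then none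
          else some (((s.1 : Int), (s.2 : Int)), PySem.Set.ofList (bfound es s)))).map
          (fun q => (q.1.1, q.1.2, q.2)) := by
  have hdict : ((PySem.List.enumerate es).foldl (fun d rp =>
      (PySem.List.enumerate rp.2).foldl (fun d cp =>
        if cp.2 == "*" then
          if (pvDirs.foldl (fun fd dir =>
              if (0 : Int) ≤ rp.1 + dir.1 ∧ rp.1 + dir.1 < (es.length : Int) ∧ (0 : Int) ≤ cp.1 + dir.2 ∧
                  cp.1 + dir.2 < ((rp.2).length : Int) then
                if cp.1 + dir.2 < ((PySem.List.pyGetD (pvTableOf es) (rp.1 + dir.1) []).length : Int) then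
                  match PySem.List.pyGetD (PySem.List.pyGetD (pvTableOf es) (rp.1 + dir.1) [])
                      (cp.1 + dir.2) none with
                  | some t => if t ∈ fd then fd else fd ++ [t]
                  | none => fd
                else fd
              else fd) []).isEmpty then d
          else PySem.Dict.insert d (rp.1, cp.1)
            (PySem.Set.ofList (pvDirs.foldl (fun fd dir =>
              if (0 : Int) ≤ rp.1 + dir.1 ∧ rp.1 + dir.1 < (es.length : Int) ∧ (0 : Int) ≤ cp.1 + dir.2 ∧
                  cp.1 + dir.2 < ((rp.2).length : Int) then
                if cp.1 + dir.2 < ((PySem.List.pyGetD (pvTableOf es) (rp.1 + dir.1) []).length : Int) then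
                  match PySem.List.pyGetD (PySem.List.pyGetD (pvTableOf es) (rp.1 + dir.1) [])
                      (cp.1 + dir.2) none with
                  | some t => if t ∈ fd then fd else fd ++ [t]
                  | none => fd
                else fd
              else fd) []))
        else d) d) PySem.Dict.empty)
      = (nfStars es).foldl (fun d s => if (bfound es s).isEmpty then d
          else PySem.Dict.insert d ((s.1 : Int), (s.2 : Int)) (PySem.Set.ofList (bfound es s)))
          PySem.Dict.empty := by
    rw [PySem.List.enumerate_eq_map_pyRange es [], PySem.List.len_eq,
        PySem.List.pyRange_zero_natCast, List.foldl_map, List.foldl_map]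
    rw [pvGridFold es (fun d r c => if (bfound es (r, c)).isEmpty then d
          else PySem.Dict.insert d ((r : Int), (c : Int)) (PySem.Set.ofList (bfound es (r, c))))
        PySem.Dict.empty]
    apply PySem.List.foldl_congr_mem
    intro acc r _
    show (PySem.List.enumerate (PySem.List.pyGetD es (r : Int) [])).foldl _ acc = _
    rw [PySem.List.pyGetD_natCast]
    rw [PySem.List.enumerate_eq_map_pyRange (es.getD r []) "", PySem.List.len_eq,
        PySem.List.pyRange_zero_natCast, List.foldl_map, List.foldl_map]
    apply PySem.List.foldl_congr_mem
    intro acc2 c _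
    simp only [PySem.List.pyGetD_natCast]
    by_cases hstar : ((es.getD r []).getD c "" == "*") = true
    · rw [if_pos hstar, if_pos hstar]
      have hbody : ∀ (fd : List (Int × Int × Int)) (dir : Int × Int), dir ∈ pvDirs →
          (if 0 ≤ (r : Int) + dir.1 ∧ (r : Int) + dir.1 < (es.length : Int) ∧
              0 ≤ (c : Int) + dir.2 ∧ (c : Int) + dir.2 < ((es.getD r []).length : Int) then
            if (c : Int) + dir.2 <
                ((PySem.List.pyGetD (pvTableOf es) ((r : Int) + dir.1) []).length : Int) then
              match PySem.List.pyGetD (PySem.List.pyGetD (pvTableOf es) ((r : Int) + dir.1) [])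
                  ((c : Int) + dir.2) none with
              | some t => if t ∈ fd then fd else fd ++ [t]
              | none => fd
            else fd
          else fd)
          = (match blook es (r, c) dir with
             | some t => if t ∈ fd then fd else fd ++ [t]
             | none => fd) := by
        intro fd dir _
        unfold blook
        by_cases hg : 0 ≤ (r : Int) + dir.1 ∧ (r : Int) + dir.1 < (es.length : Int) ∧
            0 ≤ (c : Int) + dir.2 ∧ (c : Int) + dir.2 < ((es.getD r []).length : Int)
        · rw [if_pos hg, if_pos hg]
          by_cases hlen : (c : Int) + dir.2 <
              ((PySem.List.pyGetD (pvTableOf es) ((r : Int) + dir.1) []).length : Int)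
          · rw [if_pos hlen, if_pos hlen]
          · rw [if_neg hlen, if_neg hlen]
        · rw [if_neg hg, if_neg hg]
      have hfound : (pvDirs.foldl (fun fd dir =>
          if 0 ≤ (r : Int) + dir.1 ∧ (r : Int) + dir.1 < (es.length : Int) ∧
              0 ≤ (c : Int) + dir.2 ∧ (c : Int) + dir.2 < ((es.getD r []).length : Int) then
            if (c : Int) + dir.2 <
                ((PySem.List.pyGetD (pvTableOf es) ((r : Int) + dir.1) []).length : Int) then
              match PySem.List.pyGetD (PySem.List.pyGetD (pvTableOf es) ((r : Int) + dir.1) [])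
                  ((c : Int) + dir.2) none with
              | some t => if t ∈ fd then fd else fd ++ [t]
              | none => fd
            else fd
          else fd) []) = bfound es (r, c) :=
        Eq.trans (PySem.List.foldl_congr_mem _ _ _ []
            (fun fd dir hdir => hbody fd dir hdir))
          (pvFoundFold (blook es (r, c)) pvDirs [])
      rw [hfound]
    · rw [if_neg hstar, if_neg hstar]
  refine Eq.trans (congrArg (fun dd : PySem.Dict (Int × Int) (PySem.Set (Int × Int × Int)) =>
    dd.items.map (fun q : (Int × Int) × PySem.Set (Int × Int × Int) => (q.1.1, q.1.2, q.2))) hdict) ?_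
  beta_reduce
  rw [pvGroupB es (bfound es) (nfStars es) PySem.Dict.empty PySem.Dict.nodup_keys_empty
    (nfStars_key_nodup es) (fun s _ => PySem.Dict.contains_empty _)]
  rfl

-- ===== VERDICT (by name: the statement is the Claim_ definition above) =====

theorem build_numbers_from_starting_positions_py_spec :
    Claim_equal_build_numbers_from_starting_positions_py := by
  intro es _ hpre
  have htr : ∀ s ∈ nfStars es, bfound es s = PySem.Set.ofList (nfTrips es s) := by
    intro s hs
    rw [nfStars_mem] at hs
    obtain ⟨hr, hc, hstar⟩ := hs
    unfold bfound
    rw [List.filterMap_congr (fun dd hdd => look_eq es hpre s hr hc hstar dd hdd)]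
    rfl
  have hAB : (nfStars es).filterMap (fun s => if nfTrips es s = [] then none
        else some (((s.1 : Int), (s.2 : Int)), PySem.Set.ofList (nfTrips es s)))
      = (nfStars es).filterMap (fun s => if bfound es s = [] then none
        else some (((s.1 : Int), (s.2 : Int)), PySem.Set.ofList (bfound es s))) := by
    apply List.filterMap_congr
    intro s hs
    rw [htr s hs, PySem.Set.ofList_ofList]
    by_cases hE : nfTrips es s = []
    · rw [if_pos hE, if_pos (by rw [hE]; rfl)]
    · rw [if_neg hE, if_neg (ofList_ne_nil hE)]
  show build_numbers_from_starting_positions_py es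
      = build_numbers_from_starting_positions_py_alt es
  calc build_numbers_from_starting_positions_py es
      = ((nfStars es).filterMap (fun s => if nfTrips es s = [] then none
          else some (((s.1 : Int), (s.2 : Int)), PySem.Set.ofList (nfTrips es s)))).map
          (fun q : (Int × Int) × PySem.Set (Int × Int × Int) => (q.1.1, q.1.2, q.2)) :=
        congrArg (List.map (fun q : (Int × Int) × PySem.Set (Int × Int × Int) =>
          (q.1.1, q.1.2, q.2))) (A_items es)
    _ = ((nfStars es).filterMap (fun s => if bfound es s = [] then none
          else some (((s.1 : Int), (s.2 : Int)), PySem.Set.ofList (bfound es s)))).map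
          (fun q : (Int × Int) × PySem.Set (Int × Int × Int) => (q.1.1, q.1.2, q.2)) :=
        congrArg (List.map (fun q : (Int × Int) × PySem.Set (Int × Int × Int) =>
          (q.1.1, q.1.2, q.2))) hAB
    _ = build_numbers_from_starting_positions_py_alt es := (B_items es).symm
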